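-- pv_equiv track=rewrite | github.com/wangelik/TraVaS | implementation/sacofa/privatize_ba/behavioralAppropriateness.py | getPrecedesRelations
-- ===== SOURCE A (Python) =====
-- def getPrecedesRelations(allEvents, traces):
--
--     precedesMatrix = {}
--     alwaysCtr = 0
--     sometimesCtr = len(allEvents) * len(allEvents)  # In the beginning, all relations are 'Sometimes'.
--     neverCtr = 0
--
--     for event in allEvents:
--
--         alwaysPrecedes = allEvents.copy()
--         neverPrecedes = allEvents.copy()
--
--         for eClmn in allEvents:                 # eClmn -> event in respective column
--             precedesMatrix[(event, eClmn)] = 'S'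
--
--         for trace in traces:
--             if event in trace:
--                 predecessors = getPredecessorsOfEventInTrace(event=event, trace=trace)
--
--                 for p in predecessors:
--                     if p in neverPrecedes:
--                         neverPrecedes.remove(p)
--
--                 for e in allEvents:
--                     if e not in predecessors:
--                         if e in alwaysPrecedes:
--                             alwaysPrecedes.remove(e)
--
--         for a in alwaysPrecedes:
--             precedesMatrix[(event, a)] = 'A'
--             sometimesCtr -= 1
--             alwaysCtr += 1
--
--         for n in neverPrecedes:
--             precedesMatrix[(event, n)] = 'N'
--             sometimesCtr -= 1
--             neverCtr += 1
--
--     return precedesMatrix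
--
-- def getPredecessorsOfEventInTrace(event, trace):
--
--     predecessors = list()
--
--     if event not in trace:
--         return predecessors
--
--     eventIndex = max(loc for loc, val in enumerate(trace) if val == event)
--     restTrace = trace[:eventIndex]
--
--     for e in restTrace:
--         if e not in predecessors:
--             predecessors.append(e)
--
--     return predecessors
-- ===== SOURCE B (Python) =====
-- def getPrecedesRelations(allEvents, traces):
--     precedesMatrix = {}
--     for event in allEvents:
--         numTraces = 0
--         count = {}
--         for trace in traces:
--             if event in trace:
--                 numTraces += 1
--                 for e in _distinctPredecessors(event, trace):
--                     count[e] = count.get(e, 0) + 1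
--         for e in allEvents:
--             c = count.get(e, 0)
--             if c == 0:
--                 precedesMatrix[(event, e)] = 'N'
--             elif c == numTraces:
--                 precedesMatrix[(event, e)] = 'A'
--             else:
--                 precedesMatrix[(event, e)] = 'S'
--     return precedesMatrix
--
-- def _distinctPredecessors(event, trace):
--     eventIndex = max(loc for loc, val in enumerate(trace) if val == event)
--     return set(trace[:eventIndex])
-- ===== Notes on version B (the rewrite author's own statement) =====
-- stated objective: simpler
-- what changed: A keeps two mutable copy-lists per event and repeatedly list.remove's from them inside every trace (plus a full allEvents scan with remove per trace); B instead counts, per event, in how many containing traces each other event occurs as a predecessor (one count dict per event) and classifies each cell in a single pass: 'N' if count==0, 'A' if count==numTraces, else 'S'.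
-- outside the precondition, e.g. on getPrecedesRelations(['a', 'a'], [['a', 'a']]): A returns {('a', 'a'): 'N'}, B returns {('a', 'a'): 'A'}
import Mathlib
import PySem

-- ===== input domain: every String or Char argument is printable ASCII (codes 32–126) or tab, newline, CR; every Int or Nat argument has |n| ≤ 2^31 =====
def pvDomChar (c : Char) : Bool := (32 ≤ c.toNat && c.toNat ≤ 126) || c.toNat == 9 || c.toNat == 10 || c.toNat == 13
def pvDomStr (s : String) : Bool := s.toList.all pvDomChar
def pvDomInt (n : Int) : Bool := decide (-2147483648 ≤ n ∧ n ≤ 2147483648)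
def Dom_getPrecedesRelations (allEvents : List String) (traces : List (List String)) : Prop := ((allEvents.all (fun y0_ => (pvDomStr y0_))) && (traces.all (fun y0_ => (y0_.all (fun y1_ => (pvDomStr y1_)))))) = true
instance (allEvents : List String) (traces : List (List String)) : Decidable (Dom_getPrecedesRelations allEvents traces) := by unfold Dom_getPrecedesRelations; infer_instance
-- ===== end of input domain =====

-- B replaces A's mutable remove-list bookkeeping by a per-event predecessor-count table and one
-- classification pass (objective: simpler). Equivalence is claimed for duplicate-free allEvents (Pre_).


-- ===== PORT A =====
-- shared line of both Pythons: eventIndex = max(loc for loc, val in enumerate(trace) if val == event); then trace[:eventIndex]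
def pvPrefixBeforeLast (event : String) (trace : List String) : List String :=
  let eventIndex : Int :=
    ((PySem.List.max? (((PySem.List.enumerate trace).filter (fun p => p.2 == event)).map (·.1)) (fun x => x)).getD 0)
  PySem.List.slice trace none (some eventIndex)

def getPredecessorsOfEventInTrace (event : String) (trace : List String) : List String :=
  if event ∈ trace then
    (pvPrefixBeforeLast event trace).foldl (fun ps e => if e ∈ ps then ps else ps ++ [e]) []
  else []   -- early "return predecessors" ([]) when event not in trace

-- the body of A's outer 'for event in allEvents' loop (A's always/sometimes/never counters are dead code, not returned)
def pvA_row (allEvents : List String) (traces : List (List String))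
    (d : PySem.Dict (String × String) String) (event : String) : PySem.Dict (String × String) String :=
  let d1 := allEvents.foldl (fun d eClmn => d.insert (event, eClmn) "S") d
  let st := traces.foldl (fun (st : List String × List String) trace =>
    if event ∈ trace then
      let predecessors := getPredecessorsOfEventInTrace event trace
      let never := predecessors.foldl
        (fun n p => if p ∈ n then ((PySem.List.remove? n p).getD n) else n) st.2
      let always := allEvents.foldl
        (fun a e => if e ∉ predecessors then (if e ∈ a then ((PySem.List.remove? a e).getD a) else a) else a) st.1
      (always, never)
    else st) (allEvents, allEvents)
  let d2 := st.1.foldl (fun d a => d.insert (event, a) "A") d1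
  st.2.foldl (fun d n => d.insert (event, n) "N") d2

def getPrecedesRelations (allEvents : List String) (traces : List (List String)) : List (String × String × String) :=
  ((allEvents.foldl (pvA_row allEvents traces) PySem.Dict.empty).items).map (fun p => (p.1.1, p.1.2, p.2))

-- ===== PORT B =====
def pvDistinctPredecessors (event : String) (trace : List String) : PySem.Set String :=
  PySem.Set.ofList (pvPrefixBeforeLast event trace)

def pvB_row (allEvents : List String) (traces : List (List String))
    (d : PySem.Dict (String × String) String) (event : String) : PySem.Dict (String × String) String :=
  let c := traces.foldl (fun (nc : Int × PySem.Dict String Int) trace =>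
    if event ∈ trace then
      (nc.1 + 1, (pvDistinctPredecessors event trace).foldl (fun cnt e => cnt.insert e (cnt.getD e 0 + 1)) nc.2)
    else nc) (0, PySem.Dict.empty)
  allEvents.foldl (fun d e =>
    let cv := c.2.getD e 0
    if cv == 0 then d.insert (event, e) "N"
    else if cv == c.1 then d.insert (event, e) "A"
    else d.insert (event, e) "S") d

def getPrecedesRelations_alt (allEvents : List String) (traces : List (List String)) : List (String × String × String) :=
  ((allEvents.foldl (pvB_row allEvents traces) PySem.Dict.empty).items).map (fun p => (p.1.1, p.1.2, p.2))

-- ===== PRECONDITION & SPEC =====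
-- Pre_ excludes allEvents lists with duplicate entries: there A's per-occurrence list.remove bookkeeping
-- marks cells 'N'/'A' accidentally (a duplicate-key corner), while B classifies each distinct event once.
def Pre_getPrecedesRelations (allEvents : List String) (traces : List (List String)) : Prop :=
  allEvents.Nodup
instance (allEvents : List String) (traces : List (List String)) : Decidable (Pre_getPrecedesRelations allEvents traces) := by unfold Pre_getPrecedesRelations; infer_instance

def pvWitness_getPrecedesRelations : List String × List (List String) := (["a", "b"], [["a", "b"], ["b"]])

def Spec_getPrecedesRelations (allEvents : List String) (traces : List (List String)) (out : List (String × String × String)) : Prop := out = getPrecedesRelations_alt allEvents traces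
instance (allEvents : List String) (traces : List (List String)) (out : List (String × String × String)) : Decidable (Spec_getPrecedesRelations allEvents traces out) := by unfold Spec_getPrecedesRelations; infer_instance

-- ===== CLAIM (what is proved, stated in full; the proofs are below) =====
def Claim_equal_getPrecedesRelations : Prop := ∀ (allEvents : List String) (traces : List (List String)), Dom_getPrecedesRelations allEvents traces → Pre_getPrecedesRelations allEvents traces → Spec_getPrecedesRelations allEvents traces (getPrecedesRelations allEvents traces)

-- ===== LEMMAS AND PROOFS =====

-- abstractions used only by the proofs: the relevant traces, the per-cell count, the cell value, one row
def pvRel (event : String) (traces : List (List String)) : List (List String) :=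
  traces.filter (fun t => decide (event ∈ t))
def pvCnt (event e : String) (traces : List (List String)) : Nat :=
  (pvRel event traces).countP (fun t => decide (e ∈ pvDistinctPredecessors event t))
def pvVal (event e : String) (traces : List (List String)) : String :=
  if pvCnt event e traces = 0 then "N"
  else if pvCnt event e traces = (pvRel event traces).length then "A" else "S"
def pvRow (cols : List String) (traces : List (List String)) (event : String) :
    List ((String × String) × String) :=
  cols.map (fun c => ((event, c), pvVal event c traces))

-- A's manual dedup loop builds exactly set(prefix)
lemma predsA_eq (event : String) (t : List String) (h : event ∈ t) :
    getPredecessorsOfEventInTrace event t = pvDistinctPredecessors event t := by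
  simp only [getPredecessorsOfEventInTrace, if_pos h, pvDistinctPredecessors,
    PySem.Set.ofList_eq_foldl]
  congr 1
  funext ps e
  rw [PySem.Set.add_eq_ite]

lemma remove_step_eq :
    (fun (n : List String) p => if p ∈ n then ((PySem.List.remove? n p).getD n) else n)
      = fun n p => n.erase p := by
  funext n p
  by_cases hp : p ∈ n
  · rw [if_pos hp, PySem.List.remove?_eq_some_erase n p hp]; rfl
  · rw [if_neg hp, List.erase_of_not_mem hp]

lemma foldl_erase_mem (l : List String) : ∀ (n : List String), n.Nodup →
    (∀ x, x ∈ l.foldl List.erase n ↔ x ∈ n ∧ x ∉ l) ∧ (l.foldl List.erase n).Nodup := by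
  induction l with
  | nil => intro n hn; simpa using hn
  | cons p l ih =>
    intro n hn
    obtain ⟨ihm, ihnd⟩ := ih (n.erase p) (hn.erase p)
    refine ⟨fun x => ?_, ihnd⟩
    rw [List.foldl_cons, ihm x, hn.mem_erase_iff]
    simp [and_comm, and_assoc]
    tauto

-- membership through A's never loop (guarded removes)
lemma never_fold_mem (l n : List String) (hn : n.Nodup) :
    (∀ x, x ∈ l.foldl (fun n p => if p ∈ n then ((PySem.List.remove? n p).getD n) else n) n
      ↔ x ∈ n ∧ x ∉ l)
    ∧ (l.foldl (fun n p => if p ∈ n then ((PySem.List.remove? n p).getD n) else n) n).Nodup := by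
  rw [remove_step_eq]
  exact foldl_erase_mem l n hn

lemma always_step_eq (preds : List String) :
    (fun (a : List String) e => if e ∉ preds then (if e ∈ a then ((PySem.List.remove? a e).getD a) else a) else a)
      = fun a e => if e ∈ preds then a else a.erase e := by
  funext a e
  by_cases hp : e ∈ preds
  · simp [hp]
  · rw [if_pos hp, if_neg hp]
    by_cases ha : e ∈ a
    · rw [if_pos ha, PySem.List.remove?_eq_some_erase a e ha]; rfl
    · rw [if_neg ha, List.erase_of_not_mem ha]

-- membership through A's always inner loop
lemma always_fold_mem (l preds : List String) : ∀ (a : List String), a.Nodup →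
    (∀ x, x ∈ l.foldl (fun a e => if e ∉ preds then (if e ∈ a then ((PySem.List.remove? a e).getD a) else a) else a) a
      ↔ x ∈ a ∧ (x ∉ l ∨ x ∈ preds))
    ∧ (l.foldl (fun a e => if e ∉ preds then (if e ∈ a then ((PySem.List.remove? a e).getD a) else a) else a) a).Nodup := by
  rw [always_step_eq]
  induction l with
  | nil => intro a ha; simpa using ha
  | cons e l ih =>
    intro a ha
    by_cases hp : e ∈ preds
    · obtain ⟨ihm, ihnd⟩ := ih a ha
      refine ⟨fun x => ?_, by simpa [hp] using ihnd⟩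
      rw [List.foldl_cons, if_pos hp, ihm x]
      by_cases hx : x = e <;> simp [hx, hp]
    · obtain ⟨ihm, ihnd⟩ := ih (a.erase e) (ha.erase e)
      refine ⟨fun x => ?_, by simpa [hp] using ihnd⟩
      rw [List.foldl_cons, if_neg hp, ihm x, ha.mem_erase_iff]
      by_cases hx : x = e <;> simp [hx, hp]

-- the traces fold of A, characterised by membership
lemma traces_fold_mem (allEvents : List String) (event : String) (ts : List (List String)) :
    ∀ (a n : List String), a.Nodup → n.Nodup →
    (let st := ts.foldl (fun (st : List String × List String) trace =>
        if event ∈ trace then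
          let predecessors := getPredecessorsOfEventInTrace event trace
          let never := predecessors.foldl
            (fun n p => if p ∈ n then ((PySem.List.remove? n p).getD n) else n) st.2
          let always := allEvents.foldl
            (fun a e => if e ∉ predecessors then (if e ∈ a then ((PySem.List.remove? a e).getD a) else a) else a) st.1
          (always, never)
        else st) (a, n)
     (∀ x, x ∈ st.1 ↔ x ∈ a ∧ ∀ t ∈ ts, event ∈ t → (x ∉ allEvents ∨ x ∈ getPredecessorsOfEventInTrace event t))
     ∧ (∀ x, x ∈ st.2 ↔ x ∈ n ∧ ∀ t ∈ ts, event ∈ t → x ∉ getPredecessorsOfEventInTrace event t)) := by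
  induction ts with
  | nil => intro a n ha hn; simp
  | cons t ts ih =>
    intro a n ha hn
    by_cases ht : event ∈ t
    · simp only [List.foldl_cons, if_pos ht]
      obtain ⟨hnm, hnnd⟩ := never_fold_mem (getPredecessorsOfEventInTrace event t) n hn
      obtain ⟨ham, hand⟩ := always_fold_mem allEvents (getPredecessorsOfEventInTrace event t) a ha
      obtain ⟨iha, ihn⟩ := ih _ _ hand hnnd
      constructor
      · intro x
        rw [iha x, ham x]
        constructor
        · rintro ⟨⟨hxa, hc⟩, hrest⟩
          refine ⟨hxa, ?_⟩
          intro t' ht' he'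
          rcases List.mem_cons.mp ht' with rfl | ht''
          · tauto
          · exact hrest t' ht'' he'
        · rintro ⟨hxa, hall⟩
          have h0 := hall t (List.mem_cons_self) ht
          exact ⟨⟨hxa, by tauto⟩, fun t' ht' he' => hall t' (List.mem_cons_of_mem _ ht') he'⟩
      · intro x
        rw [ihn x, hnm x]
        constructor
        · rintro ⟨⟨hxn, hc⟩, hrest⟩
          refine ⟨hxn, ?_⟩
          intro t' ht' he'
          rcases List.mem_cons.mp ht' with rfl | ht''
          · exact hc
          · exact hrest t' ht'' he'
        · rintro ⟨hxn, hall⟩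
          exact ⟨⟨hxn, hall t (List.mem_cons_self) ht⟩, fun t' ht' he' => hall t' (List.mem_cons_of_mem _ ht') he'⟩
    · simp only [List.foldl_cons, if_neg ht]
      obtain ⟨iha, ihn⟩ := ih a n ha hn
      constructor
      · intro x
        rw [iha x]
        constructor
        · rintro ⟨hxa, hrest⟩
          exact ⟨hxa, fun t' ht' he' => by rcases List.mem_cons.mp ht' with rfl | h; exact absurd he' ht; exact hrest t' h he'⟩
        · rintro ⟨hxa, hall⟩
          exact ⟨hxa, fun t' ht' he' => hall t' (List.mem_cons_of_mem _ ht') he'⟩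
      · intro x
        rw [ihn x]
        constructor
        · rintro ⟨hxn, hrest⟩
          exact ⟨hxn, fun t' ht' he' => by rcases List.mem_cons.mp ht' with rfl | h; exact absurd he' ht; exact hrest t' h he'⟩
        · rintro ⟨hxn, hall⟩
          exact ⟨hxn, fun t' ht' he' => hall t' (List.mem_cons_of_mem _ ht') he'⟩

-- overwriting keys that are already in one row of the dict
lemma items_overwrite (event v : String) (cols : List String)
    (base : List ((String × String) × String)) (l : List String) :
    ∀ (g : String → String) (d : PySem.Dict (String × String) String),
    d.items = base ++ cols.map (fun c => ((event, c), g c)) →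
    (∀ p ∈ base, (p.1).1 ≠ event) →
    (∀ x ∈ l, x ∈ cols) →
    (l.foldl (fun d x => d.insert (event, x) v) d).items
      = base ++ cols.map (fun c => ((event, c), if c ∈ l then v else g c)) := by
  induction l with
  | nil => intro g d hitems _ _; simpa using hitems
  | cons x l ih =>
    intro g d hitems hbase hl
    have hxc : x ∈ cols := hl x List.mem_cons_self
    have hcont : d.contains (event, x) = true := by
      rw [PySem.Dict.contains_iff_mem_keys]
      show (event, x) ∈ d.items.map (·.1)
      rw [hitems]
      simp only [List.map_append, List.mem_append, List.map_map, List.mem_map]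
      right
      exact ⟨x, hxc, rfl⟩
    rw [List.foldl_cons]
    rw [ih (fun c => if c = x then v else g c) (d.insert (event, x) v) ?_ hbase
        (fun y hy => hl y (List.mem_cons_of_mem _ hy))]
    · congr 1
      apply List.map_congr_left
      intro c _
      by_cases hc : c = x <;> by_cases hcl : c ∈ l <;> simp [hc, hcl]
    · rw [PySem.Dict.items_insert_of_contains d v hcont, hitems]
      rw [List.map_append]
      congr 1
      · have h1 : base.map (fun p => if (p.1 == ((event, x) : String × String)) = true then ((event, x), v) else p) = base.map id := by
          apply List.map_congr_left
          intro p hp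
          have hne : (p.1 == ((event, x) : String × String)) = false := by
            simp only [beq_eq_false_iff_ne, ne_eq]
            intro h
            exact hbase p hp (by rw [h])
          simp [hne]
        rw [h1, List.map_id]
      · rw [List.map_map]
        apply List.map_congr_left
        intro c _
        by_cases hc : c = x
        · subst hc; simp
        · simp [hc]

lemma fresh_of_keys (event : String) (d : PySem.Dict (String × String) String)
    (hkeys : ∀ p ∈ d.items, (p.1).1 ≠ event) :
    ∀ c : String, d.contains (event, c) = false := by
  intro c
  rw [← Bool.not_eq_true, PySem.Dict.contains_iff_mem_keys]
  show (event, c) ∉ d.items.map (·.1)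
  intro h
  obtain ⟨p, hp, hpe⟩ := List.mem_map.mp h
  exact hkeys p hp (by rw [hpe])

lemma map_fst_nodup (event : String) (cols : List String) (h : cols.Nodup) :
    (cols.map (fun c => ((event, c) : String × String))).Nodup :=
  h.map (fun _ _ hab => congrArg Prod.snd hab)

lemma cnt_zero_iff (event c : String) (traces : List (List String)) :
    pvCnt event c traces = 0 ↔ ∀ t ∈ traces, event ∈ t → c ∉ pvDistinctPredecessors event t := by
  unfold pvCnt pvRel
  rw [List.countP_eq_zero]
  constructor
  · intro h t ht he
    have := h t (List.mem_filter.mpr ⟨ht, by simpa using he⟩)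
    simpa using this
  · intro h t ht
    obtain ⟨h1, h2⟩ := List.mem_filter.mp ht
    simpa using h t h1 (by simpa using h2)

lemma cnt_full_iff (event c : String) (traces : List (List String)) :
    pvCnt event c traces = (pvRel event traces).length
      ↔ ∀ t ∈ traces, event ∈ t → c ∈ pvDistinctPredecessors event t := by
  unfold pvCnt pvRel
  rw [List.countP_eq_length]
  constructor
  · intro h t ht he
    simpa using h t (List.mem_filter.mpr ⟨ht, by simpa using he⟩)
  · intro h t ht
    obtain ⟨h1, h2⟩ := List.mem_filter.mp ht
    simpa using h t h1 (by simpa using h2)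

-- one row of A
lemma rowA_items (allEvents : List String) (traces : List (List String)) (event : String)
    (d : PySem.Dict (String × String) String) (hnd : allEvents.Nodup)
    (hkeys : ∀ p ∈ d.items, (p.1).1 ≠ event) :
    (pvA_row allEvents traces d event).items = d.items ++ pvRow allEvents traces event := by
  have hfresh := fresh_of_keys event d hkeys
  obtain ⟨ha, hn⟩ := traces_fold_mem allEvents event traces allEvents allEvents hnd hnd
  unfold pvA_row
  set st := traces.foldl (fun (st : List String × List String) trace =>
    if event ∈ trace then
      let predecessors := getPredecessorsOfEventInTrace event trace
      let never := predecessors.foldl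
        (fun n p => if p ∈ n then ((PySem.List.remove? n p).getD n) else n) st.2
      let always := allEvents.foldl
        (fun a e => if e ∉ predecessors then (if e ∈ a then ((PySem.List.remove? a e).getD a) else a) else a) st.1
      (always, never)
    else st) (allEvents, allEvents) with hst
  set d1 := allEvents.foldl (fun d eClmn => d.insert (event, eClmn) "S") d with hd1
  have h1 : d1.items = d.items ++ allEvents.map (fun c => (((event, c) : String × String), "S")) := by
    rw [hd1]
    simpa using PySem.Dict.items_foldl_insert_fresh allEvents (fun c => ((event, c) : String × String))
      (fun _ => "S") d (fun a _ => hfresh a) (map_fst_nodup event allEvents hnd)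
  have h2 := items_overwrite event "A" allEvents d.items st.1 (fun _ => "S") d1 h1 hkeys
    (fun x hx => ((ha x).mp hx).1)
  have h3 := items_overwrite event "N" allEvents d.items st.2
    (fun c => if c ∈ st.1 then "A" else "S") (st.1.foldl (fun d a => d.insert (event, a) "A") d1)
    h2 hkeys (fun x hx => ((hn x).mp hx).1)
  rw [h3]
  congr 1
  unfold pvRow
  apply List.map_congr_left
  intro c hc
  congr 1
  show (if c ∈ st.2 then "N" else if c ∈ st.1 then "A" else "S") = pvVal event c traces
  -- translate memberships into counts
  have hmem2 : c ∈ st.2 ↔ pvCnt event c traces = 0 := by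
    rw [hn c, cnt_zero_iff]
    constructor
    · rintro ⟨-, h⟩ t ht he
      rw [← predsA_eq event t he]
      exact h t ht he
    · intro h
      exact ⟨hc, fun t ht he => by rw [predsA_eq event t he]; exact h t ht he⟩
  have hmem1 : c ∈ st.1 ↔ pvCnt event c traces = (pvRel event traces).length := by
    rw [ha c, cnt_full_iff]
    constructor
    · rintro ⟨-, h⟩ t ht he
      rcases h t ht he with h' | h'
      · exact absurd hc h'
      · rw [← predsA_eq event t he]; exact h'
    · intro h
      exact ⟨hc, fun t ht he => Or.inr (by rw [predsA_eq event t he]; exact h t ht he)⟩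
  unfold pvVal
  by_cases h0 : pvCnt event c traces = 0
  · rw [if_pos (hmem2.mpr h0), if_pos h0]
  · rw [if_neg (fun hx => h0 (hmem2.mp hx)), if_neg h0]
    by_cases hF : pvCnt event c traces = (pvRel event traces).length
    · rw [if_pos (hmem1.mpr hF), if_pos hF]
    · rw [if_neg (fun hx => hF (hmem1.mp hx)), if_neg hF]

-- the counting fold of B, characterised
lemma cnt_fold (event : String) (ts : List (List String)) :
    ∀ (n0 : Int) (d0 : PySem.Dict String Int),
    (ts.foldl (fun (nc : Int × PySem.Dict String Int) trace =>
        if event ∈ trace then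
          (nc.1 + 1, (pvDistinctPredecessors event trace).foldl (fun cnt e => cnt.insert e (cnt.getD e 0 + 1)) nc.2)
        else nc) (n0, d0)).1 = n0 + ((pvRel event ts).length : Int)
    ∧ ∀ e, ((ts.foldl (fun (nc : Int × PySem.Dict String Int) trace =>
        if event ∈ trace then
          (nc.1 + 1, (pvDistinctPredecessors event trace).foldl (fun cnt e => cnt.insert e (cnt.getD e 0 + 1)) nc.2)
        else nc) (n0, d0)).2).getD e 0 = d0.getD e 0 + (pvCnt event e ts : Int) := by
  induction ts with
  | nil => intro n0 d0; simp [pvRel, pvCnt]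
  | cons t ts ih =>
    intro n0 d0
    by_cases ht : event ∈ t
    · simp only [List.foldl_cons, if_pos ht]
      have hrel : pvRel event (t :: ts) = t :: pvRel event ts := by simp [pvRel, ht]
      obtain ⟨ih1, ih2⟩ := ih (n0 + 1)
        ((pvDistinctPredecessors event t).foldl (fun cnt e => cnt.insert e (cnt.getD e 0 + 1)) d0)
      constructor
      · rw [ih1, hrel]
        simp only [List.length_cons]
        push_cast
        ring
      · intro e
        rw [ih2 e, PySem.Dict.getD_foldl_insert_add_one]
        have hcnt : pvCnt event e (t :: ts)
            = (if e ∈ pvDistinctPredecessors event t then 1 else 0) + pvCnt event e ts := by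
          unfold pvCnt
          rw [hrel, List.countP_cons]
          by_cases he : e ∈ pvDistinctPredecessors event t <;> simp [he, Nat.add_comm]
        have hcount : (pvDistinctPredecessors event t).count e
            = (if e ∈ pvDistinctPredecessors event t then 1 else 0) := by
          by_cases he : e ∈ pvDistinctPredecessors event t
          · rw [if_pos he]
            exact List.count_eq_one_of_mem (PySem.Set.nodup_ofList _) he
          · rw [if_neg he]
            exact List.count_eq_zero.mpr he
        rw [hcount, hcnt]
        by_cases he : e ∈ pvDistinctPredecessors event t <;> (simp [he]; try ring)
    · simp only [List.foldl_cons, if_neg ht]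
      have hrel : pvRel event (t :: ts) = pvRel event ts := by simp [pvRel, ht]
      obtain ⟨ih1, ih2⟩ := ih n0 d0
      refine ⟨by rw [ih1, hrel], fun e => ?_⟩
      rw [ih2 e]
      unfold pvCnt
      rw [hrel]

-- one row of B
lemma rowB_items (allEvents : List String) (traces : List (List String)) (event : String)
    (d : PySem.Dict (String × String) String) (hnd : allEvents.Nodup)
    (hkeys : ∀ p ∈ d.items, (p.1).1 ≠ event) :
    (pvB_row allEvents traces d event).items = d.items ++ pvRow allEvents traces event := by
  have hfresh := fresh_of_keys event d hkeys
  unfold pvB_row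
  set c := traces.foldl (fun (nc : Int × PySem.Dict String Int) trace =>
    if event ∈ trace then
      (nc.1 + 1, (pvDistinctPredecessors event trace).foldl (fun cnt e => cnt.insert e (cnt.getD e 0 + 1)) nc.2)
    else nc) (0, PySem.Dict.empty) with hcdef
  obtain ⟨hc1, hc2⟩ := cnt_fold event traces 0 PySem.Dict.empty
  rw [← hcdef] at hc1 hc2
  have hstep : allEvents.foldl (fun d e =>
      let cv := c.2.getD e 0
      if cv == 0 then d.insert (event, e) "N"
      else if cv == c.1 then d.insert (event, e) "A"
      else d.insert (event, e) "S") d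
    = allEvents.foldl (fun d e => d.insert (event, e) (pvVal event e traces)) d := by
    apply PySem.List.foldl_congr_mem
    intro acc e _
    have hcv : c.2.getD e 0 = (pvCnt event e traces : Int) := by
      rw [hc2 e]; simp
    have hn : c.1 = ((pvRel event traces).length : Int) := by
      rw [hc1]; simp
    show (if (c.2.getD e 0 == 0) = true then acc.insert (event, e) "N"
      else if (c.2.getD e 0 == c.1) = true then acc.insert (event, e) "A"
      else acc.insert (event, e) "S") = acc.insert (event, e) (pvVal event e traces)
    rw [hcv, hn]
    unfold pvVal
    by_cases h0 : pvCnt event e traces = 0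
    · simp [h0]
    · have h0' : ((pvCnt event e traces : Int) == 0) = false := by
        simp [h0]
      rw [h0', if_neg (by simp), if_neg h0]
      by_cases hF : pvCnt event e traces = (pvRel event traces).length
      · simp [hF]
      · have hF' : ((pvCnt event e traces : Int) == ((pvRel event traces).length : Int)) = false := by
          simp [hF]
        rw [hF', if_neg (by simp), if_neg hF]
  rw [hstep]
  have := PySem.Dict.items_foldl_insert_fresh allEvents (fun e => ((event, e) : String × String))
    (fun e => pvVal event e traces) d (fun a _ => hfresh a) (map_fst_nodup event allEvents hnd)
  simpa [pvRow] using this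

lemma fold_rows_items (row : List String → List (List String) → PySem.Dict (String × String) String → String → PySem.Dict (String × String) String)
    (hrow : ∀ allEvents traces event d, allEvents.Nodup → (∀ p ∈ d.items, (p.1).1 ≠ event) →
      (row allEvents traces d event).items = d.items ++ pvRow allEvents traces event)
    (allEvents : List String) (traces : List (List String)) :
    ∀ (evs : List String) (d : PySem.Dict (String × String) String), allEvents.Nodup → evs.Nodup →
    (∀ p ∈ d.items, (p.1).1 ∉ evs) →
    (evs.foldl (row allEvents traces) d).items = d.items ++ evs.flatMap (pvRow allEvents traces) := by
  intro evs
  induction evs with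
  | nil => intro d _ _ _; simp
  | cons ev evs ih =>
    intro d hall hnd hk
    rw [List.foldl_cons, ih _ hall hnd.of_cons ?_, hrow allEvents traces ev d hall
      (fun p hp => fun h => hk p hp (h ▸ List.mem_cons_self)), List.flatMap_cons, List.append_assoc]
    intro p hp
    rw [hrow allEvents traces ev d hall (fun p hp => fun h => hk p hp (h ▸ List.mem_cons_self))] at hp
    rcases List.mem_append.mp hp with h1 | h2
    · exact fun hm => hk p h1 (List.mem_cons_of_mem _ hm)
    · obtain ⟨c, _, hc⟩ := List.mem_map.mp h2
      rw [← hc]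
      exact (List.nodup_cons.mp hnd).1
  
-- ===== VERDICT (by name: the statement is the Claim_ definition above) =====
theorem getPrecedesRelations_spec : Claim_equal_getPrecedesRelations := by
  intro allEvents traces _ hpre
  unfold Spec_getPrecedesRelations getPrecedesRelations getPrecedesRelations_alt
  rw [fold_rows_items pvA_row rowA_items allEvents traces allEvents PySem.Dict.empty hpre hpre
        (by intro p hp; simp [PySem.Dict.empty] at hp),
      fold_rows_items pvB_row rowB_items allEvents traces allEvents PySem.Dict.empty hpre hpre
        (by intro p hp; simp [PySem.Dict.empty] at hp)]
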